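-- pv_equiv track=rewrite | github.com/Matteo-Candi/Master-Thesis | results/test_01/test_01_formatted.py | kVisibleFromLeft
-- ===== SOURCE A (Python) =====
-- def kVisibleFromLeft(n, k):
--     if n == k:
--         return 1
--     if k == 1:
--         ans = 1
--         for i in range(1, n):
--             ans *= i
--         return ans
--     return kVisibleFromLeft(n - 1, k - 1) + (n - 1) * kVisibleFromLeft(n - 1, k)
-- ===== SOURCE B (Python) =====
-- def kVisibleFromLeft(n, k):
--     if n == k:
--         return 1
--     if k == 1:
--         r = 1
--         for i in range(1, n):
--             r *= i
--         return r
--     # bottom-up DP on the unsigned Stirling-first-kind recurrence: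
--     # row holds c(m, j) for j = 1..k; c(m, j) = c(m-1, j-1) + (m-1)*c(m-1, j)
--     row = [1] + [0] * (k - 1)
--     for m in range(2, n + 1):
--         row = [a + (m - 1) * b for a, b in zip([0] + row[:-1], row)]
--     return row[-1]
-- ===== Notes on version B (the rewrite author's own statement) =====
-- stated objective: faster
-- what changed: Replaces A's exponential two-branch recursion with a bottom-up one-row dynamic program over the unsigned-Stirling recurrence c(m,j)=c(m-1,j-1)+(m-1)c(m-1,j), keeping only the current row of k entries; Pre_ excludes exactly the inputs on which A's recursion never terminates (RecursionError).
import Mathlib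
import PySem

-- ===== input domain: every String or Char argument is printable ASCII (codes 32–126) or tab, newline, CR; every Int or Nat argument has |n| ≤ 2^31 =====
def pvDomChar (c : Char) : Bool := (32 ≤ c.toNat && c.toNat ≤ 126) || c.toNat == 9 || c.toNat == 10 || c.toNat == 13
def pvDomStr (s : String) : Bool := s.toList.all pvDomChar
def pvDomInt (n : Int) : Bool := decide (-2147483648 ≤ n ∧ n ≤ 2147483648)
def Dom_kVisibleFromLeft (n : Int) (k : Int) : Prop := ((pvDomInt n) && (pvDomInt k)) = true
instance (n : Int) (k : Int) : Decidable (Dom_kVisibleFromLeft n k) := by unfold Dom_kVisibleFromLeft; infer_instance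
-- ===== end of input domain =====

-- B replaces A's exponential recursion by a bottom-up one-row DP on the same recurrence (objective: faster).

-- ===== PORT A =====
-- A is recursive and diverges outside Pre_; the fuel argument only makes the same
-- recursion total in Lean — on Pre_ the fuel n.toNat + 1 is never exhausted.
def kVisibleFromLeftFuel : Nat → Int → Int → Int
  | 0, _, _ => 0
  | fuel+1, n, k =>
    if n = k then 1
    else if k = 1 then (PySem.List.pyRange 1 n 1).foldl (fun ans i => ans * i) 1
    else kVisibleFromLeftFuel fuel (n-1) (k-1) + (n-1) * kVisibleFromLeftFuel fuel (n-1) k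

def kVisibleFromLeft (n : Int) (k : Int) : Int := kVisibleFromLeftFuel (n.toNat + 1) n k

-- ===== PORT B =====
def kVisibleFromLeft_alt (n : Int) (k : Int) : Int :=
  if n = k then 1
  else if k = 1 then (PySem.List.pyRange 1 n 1).foldl (fun r i => r * i) 1
  else
    let row0 : List Int := 1 :: List.replicate (k-1).toNat 0
    let row := (PySem.List.pyRange 2 (n+1) 1).foldl
      (fun row m => List.zipWith (fun a b => a + (m-1)*b) (0 :: row.dropLast) row) row0
    (PySem.List.pyGet? row (-1)).getD 0   -- row[-1]; row is never empty on Pre_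

-- ===== PRECONDITION & SPEC =====
-- Pre_ is exactly the set of inputs on which Python A terminates (returns a value);
-- everywhere else A's recursion never reaches a base case and raises RecursionError.
def Pre_kVisibleFromLeft (n : Int) (k : Int) : Prop := n = k ∨ k = 1 ∨ (2 ≤ k ∧ k ≤ n)
instance (n : Int) (k : Int) : Decidable (Pre_kVisibleFromLeft n k) := by unfold Pre_kVisibleFromLeft; infer_instance
def pvWitness_kVisibleFromLeft : Int × Int := (5, 3)

def Spec_kVisibleFromLeft (n : Int) (k : Int) (out : Int) : Prop := out = kVisibleFromLeft_alt n k
instance (n : Int) (k : Int) (out : Int) : Decidable (Spec_kVisibleFromLeft n k out) := by unfold Spec_kVisibleFromLeft; infer_instance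

-- ===== CLAIM (what is proved, stated in full; the proofs are below) =====
def Claim_equal_kVisibleFromLeft : Prop := ∀ (n : Int) (k : Int), Dom_kVisibleFromLeft n k → Pre_kVisibleFromLeft n k → Spec_kVisibleFromLeft n k (kVisibleFromLeft n k)

-- ===== LEMMAS AND PROOFS =====

-- reference value: unsigned Stirling numbers of the first kind (A's recurrence)
def cc : Nat → Nat → Int
  | 0, 0 => 1
  | 0, _+1 => 0
  | _+1, 0 => 0
  | m+1, j+1 => cc m j + (m : Int) * cc m (j+1)

lemma cc_succ (m j : Nat) : cc (m+1) (j+1) = cc m j + (m : Int) * cc m (j+1) := by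
  simp [cc]

lemma cc_zero_right (m : Nat) : cc (m+1) 0 = 0 := by simp [cc]

lemma cc_gt : ∀ (m j : Nat), m < j → cc m j = 0 := by
  intro m
  induction m with
  | zero => intro j h; obtain ⟨j', rfl⟩ : ∃ j', j = j'+1 := ⟨j-1, by omega⟩; simp [cc]
  | succ m ih =>
    intro j h
    obtain ⟨j', rfl⟩ : ∃ j', j = j'+1 := ⟨j-1, by omega⟩
    rw [cc_succ, ih j' (by omega), ih (j'+1) (by omega)]
    ring

lemma cc_diag (m : Nat) : cc m m = 1 := by
  induction m with
  | zero => simp [cc]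
  | succ m ih => rw [cc_succ, ih, cc_gt m (m+1) (by omega)]; ring

lemma fact_fold (N : Nat) (h : 1 ≤ N) :
    (PySem.List.pyRange 1 (N : Int) 1).foldl (fun ans i => ans * i) 1 = cc N 1 := by
  induction N with
  | zero => omega
  | succ N ih =>
    by_cases hN : 1 ≤ N
    · push_cast
      rw [PySem.List.pyRange_one_succ_right (by exact_mod_cast hN), List.foldl_append, ih hN]
      simp only [List.foldl_cons, List.foldl_nil]
      have hr : cc (N+1) 1 = cc N 0 + (N : Int) * cc N 1 := cc_succ N 0
      obtain ⟨N', rfl⟩ : ∃ N', N = N'+1 := ⟨N-1, by omega⟩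
      rw [hr, cc_zero_right]
      push_cast
      ring
    · have h0 : N = 0 := by omega
      subst h0
      norm_num [PySem.List.pyRange_one_eq_nil (by norm_num : (1:Int) ≤ 1)]
      rw [cc_succ]
      simp [cc]

lemma fuel_eq_cc : ∀ (fuel : Nat) (n k : Int), 1 ≤ k → k ≤ n → n.toNat < fuel →
    kVisibleFromLeftFuel fuel n k = cc n.toNat k.toNat := by
  intro fuel
  induction fuel with
  | zero => intro n k _ _ h; omega
  | succ fuel ih =>
    intro n k hk hkn hfuel
    by_cases hnk : n = k
    · subst hnk
      simp [kVisibleFromLeftFuel, cc_diag]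
    · by_cases hk1 : k = 1
      · subst hk1
        have hn1 : 1 ≤ n.toNat := by omega
        have hfold := fact_fold n.toNat hn1
        rw [show ((n.toNat : Nat) : Int) = n from by omega] at hfold
        simp only [kVisibleFromLeftFuel, if_neg hnk, if_pos]
        exact hfold
      · -- main case: 2 ≤ k < n
        obtain ⟨m, hm⟩ : ∃ m : Nat, n.toNat = m + 1 := ⟨n.toNat - 1, by omega⟩
        obtain ⟨j, hj⟩ : ∃ j : Nat, k.toNat = j + 1 := ⟨k.toNat - 1, by omega⟩
        have h1 := ih (n-1) (k-1) (by omega) (by omega) (by omega)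
        have h2 := ih (n-1) k (by omega) (by omega) (by omega)
        have e1 : (n-1).toNat = m := by omega
        have e2 : (k-1).toNat = j := by omega
        have e3 : (n-1 : Int) = (m : Int) := by omega
        simp only [kVisibleFromLeftFuel, if_neg hnk, if_neg hk1]
        rw [h1, h2, e1, e2, hm, hj, e3, cc_succ]

-- B's loop invariant: after processing m = 2..N the row holds cc N (j+1), j = 0..K-1
lemma alt_loop (K : Nat) (hK : 1 ≤ K) : ∀ (N : Nat), 1 ≤ N →
    (PySem.List.pyRange 2 ((N : Int) + 1) 1).foldl
      (fun row m => List.zipWith (fun a b => a + (m-1)*b) (0 :: row.dropLast) row)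
      (1 :: List.replicate (K-1) 0)
    = (List.range K).map (fun j => cc N (j+1)) := by
  intro N
  induction N with
  | zero => omega
  | succ N ih =>
    intro _
    by_cases hN : 1 ≤ N
    · push_cast
      rw [PySem.List.pyRange_one_succ_right
            (by exact_mod_cast Nat.succ_le_succ hN : (2:Int) ≤ (N:Int)+1),
          List.foldl_append, ih hN]
      simp only [List.foldl_cons, List.foldl_nil]
      apply List.ext_getElem
      · simp [List.length_zipWith]
        omega
      · intro i h1 h2
        have hiK : i < K := by simpa using h2
        rw [List.getElem_zipWith]
        rcases i with _ | i
        · simp only [List.getElem_cons_zero, List.getElem_map, List.getElem_range]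
          have hr : cc (N+1) (0+1) = cc N 0 + (N : Int) * cc N (0+1) := cc_succ N 0
          obtain ⟨N', rfl⟩ : ∃ N', N = N'+1 := ⟨N-1, by omega⟩
          rw [hr, cc_zero_right]
          push_cast
          ring
        · have hlt : i < ((List.range K).map (fun j => cc N (j+1))).dropLast.length := by
            simp
            omega
          simp only [List.getElem_cons_succ, List.getElem_dropLast, List.getElem_map,
            List.getElem_range]
          rw [cc_succ]
          ring
    · have h0 : N = 0 := by omega
      subst h0
      norm_num [PySem.List.pyRange_one_eq_nil (by norm_num : (2:Int) ≤ 2)]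
      apply List.ext_getElem
      · simp
        omega
      · intro i h1 h2
        rcases i with _ | i
        · simp [cc]
        · simp only [List.getElem_cons_succ, List.getElem_map, List.getElem_range]
          rw [List.getElem_replicate, cc_succ]
          simp [cc]

lemma alt_eq_cc (n k : Int) (hk : 2 ≤ k) (hkn : k < n) :
    kVisibleFromLeft_alt n k = cc n.toNat k.toNat := by
  have hnk : n ≠ k := by omega
  have hk1 : k ≠ 1 := by omega
  have hK1 : 1 ≤ k.toNat := by omega
  obtain ⟨N, hNc⟩ : ∃ N : Nat, n = (N : Int) := ⟨n.toNat, by omega⟩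
  have hN1 : 1 ≤ N := by omega
  simp only [kVisibleFromLeft_alt, if_neg hnk, if_neg hk1]
  have e1 : (k-1).toNat = k.toNat - 1 := by omega
  rw [e1, hNc, alt_loop k.toNat hK1 N hN1]
  rw [PySem.List.pyGet?_neg_one, List.getLast?_eq_getElem?]
  rw [show ((List.range k.toNat).map fun j => cc N (j+1)).length = k.toNat by simp]
  rw [List.getElem?_eq_getElem (by simp; omega)]
  simp only [List.getElem_map, List.getElem_range, Option.getD_some]
  have : k.toNat - 1 + 1 = k.toNat := by omega
  rw [this]
  simp

-- ===== VERDICT (by name: the statement is the Claim_ definition above) =====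
theorem kVisibleFromLeft_spec : Claim_equal_kVisibleFromLeft := by
  intro n k _ pre
  unfold Spec_kVisibleFromLeft
  by_cases hnk : n = k
  · subst hnk
    simp [kVisibleFromLeft, kVisibleFromLeftFuel, kVisibleFromLeft_alt]
  · by_cases hk1 : k = 1
    · subst hk1
      simp [kVisibleFromLeft, kVisibleFromLeftFuel, kVisibleFromLeft_alt, hnk]
    · have hk2 : 2 ≤ k := by rcases pre with h | h | h <;> omega
      have hkn : k < n := by rcases pre with h | h | h <;> omega
      rw [kVisibleFromLeft, fuel_eq_cc _ n k (by omega) (by omega) (by omega),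
        alt_eq_cc n k hk2 hkn]
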